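-- pv_equiv track=rewrite | github.com/visuals-code/bbumate | src/ingestion/d003/loader.py | _to_minimal_html
-- ===== SOURCE A (Python) =====
-- from typing import List, Literal, Dict, Optional
--
-- def _to_minimal_html(text: str) -> str:
--     """
--     Wrap plain text into minimal HTML paragraphs for downstream HTML-aware flows:
--     HTML 태그를 최소화하여 텍스트를 간단한 HTML 문서로 변환
--     """
--
--     import html
--
--     lines = [line.strip() for line in text.splitlines()]
--     paragraphs: List[str] = []
--     buffer: List[str] = []
--     for line in lines:
--         if not line:
--             if buffer:
--                 paragraphs.append("<p>" + html.escape(" ".join(buffer)) + "</p>")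
--                 buffer = []
--             continue
--         buffer.append(line)
--     if buffer:
--         paragraphs.append("<p>" + html.escape(" ".join(buffer)) + "</p>")
--     return "\n".join(paragraphs) if paragraphs else "<p></p>"
-- ===== SOURCE B (Python) =====
-- _ESCAPES = {"&": "&amp;", "<": "&lt;", ">": "&gt;", '"': "&quot;", "'": "&#x27;"}
--
--
-- def _escape(s: str) -> str:
--     """html.escape(s) done character by character (identical output)."""
--     return "".join(_ESCAPES.get(c, c) for c in s)
--
--
-- def _to_minimal_html(text: str) -> str:
--     """Two-pointer run scan over the stripped lines instead of a buffer accumulator."""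
--     stripped = [line.strip() for line in text.splitlines()]
--     paragraphs = []
--     n = len(stripped)
--     i = 0
--     while i < n:
--         if stripped[i]:
--             j = i
--             while j < n and stripped[j]:
--                 j += 1
--             paragraphs.append("<p>" + _escape(" ".join(stripped[i:j])) + "</p>")
--             i = j
--         else:
--             i += 1
--     return "\n".join(paragraphs) if paragraphs else "<p></p>"
-- ===== Notes on version B (the rewrite author's own statement) =====
-- stated objective: alternative
-- what changed: Replaces A's buffer-accumulator fold (pending-buffer state flushed on blank lines and once more at the end) with a two-pointer scan that finds each maximal run of non-empty stripped lines and emits its paragraph directly, with no pending state and no trailing flush.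
import Mathlib
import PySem

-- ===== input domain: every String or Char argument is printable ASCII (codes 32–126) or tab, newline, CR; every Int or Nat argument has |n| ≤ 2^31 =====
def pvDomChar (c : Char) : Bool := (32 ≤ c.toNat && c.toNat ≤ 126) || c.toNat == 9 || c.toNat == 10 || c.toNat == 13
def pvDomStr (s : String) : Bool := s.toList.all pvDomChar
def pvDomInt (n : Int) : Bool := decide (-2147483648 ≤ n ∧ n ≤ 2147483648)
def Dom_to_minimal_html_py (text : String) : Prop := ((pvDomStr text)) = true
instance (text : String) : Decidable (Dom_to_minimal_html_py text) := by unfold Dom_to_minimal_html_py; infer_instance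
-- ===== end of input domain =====

-- B replaces A's buffer-accumulator fold with a two-pointer scan over maximal runs of
-- non-empty stripped lines (alternative decomposition, same cost).


-- ===== PORT A =====
-- html.escape with quote=True, character by character (exact: Python escapes '&' first,
-- so a character-wise expansion produces the same string).
def pyEscapeChar (c : Char) : List Char :=
  if c = '&' then "&amp;".toList
  else if c = '<' then "&lt;".toList
  else if c = '>' then "&gt;".toList
  else if c = '"' then "&quot;".toList
  else if c = '\'' then "&#x27;".toList
  else [c]

def pyEscape (s : String) : String := String.ofList (s.toList.flatMap pyEscapeChar)

-- "<p>" + html.escape(" ".join(buf)) + "</p>"  (the same expression appears in both Pythons)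
def mkPara (buf : List String) : String := "<p>" ++ pyEscape (PySem.Str.join " " buf) ++ "</p>"

-- one step of A's for-loop over the stripped lines; state = (paragraphs, buffer)
def aStep (st : List String × List String) (line : String) : List String × List String :=
  if line = "" then
    if st.2 ≠ [] then (st.1 ++ [mkPara st.2], []) else (st.1, st.2)
  else (st.1, st.2 ++ [line])

def to_minimal_html_py (text : String) : String :=
  let lines := (PySem.Str.splitlines text).map PySem.Str.strip
  let st := lines.foldl aStep ([], [])
  let paragraphs := if st.2 ≠ [] then st.1 ++ [mkPara st.2] else st.1
  if paragraphs ≠ [] then PySem.Str.join "\n" paragraphs else "<p></p>"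

-- ===== PORT B =====
-- B's outer while-loop: skip a blank line, or consume the whole maximal run of
-- non-empty stripped lines (the inner j-scan = takeWhile, i = j step = dropWhile) and emit
-- its paragraph.  The loop runs at most n = len(stripped) iterations (i strictly grows),
-- so it is transcribed as structural recursion on that fuel.
def bScan (fuel : Nat) (lines : List String) : List String :=
  match fuel, lines with
  | 0, _ => []
  | _ + 1, [] => []
  | fuel + 1, l :: ls =>
    if l = "" then bScan fuel ls
    else mkPara (l :: ls.takeWhile (· ≠ "")) :: bScan fuel (ls.dropWhile (· ≠ ""))

def to_minimal_html_py_alt (text : String) : String :=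
  let stripped := (PySem.Str.splitlines text).map PySem.Str.strip
  let paragraphs := bScan stripped.length stripped
  if paragraphs ≠ [] then PySem.Str.join "\n" paragraphs else "<p></p>"

-- ===== PRECONDITION & SPEC =====
def Spec_to_minimal_html_py (text : String) (out : String) : Prop := out = to_minimal_html_py_alt text
instance (text : String) (out : String) : Decidable (Spec_to_minimal_html_py text out) := by unfold Spec_to_minimal_html_py; infer_instance

-- ===== CLAIM (what is proved, stated in full; the proofs are below) =====
def Claim_equal_to_minimal_html_py : Prop := ∀ (text : String), Dom_to_minimal_html_py text → Spec_to_minimal_html_py text (to_minimal_html_py text)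

-- ===== LEMMAS AND PROOFS =====
-- proof-only helper: B's scan with a pending buffer of already-seen non-empty lines
def bFrom (buf : List String) (lines : List String) : List String :=
  match lines with
  | [] => if buf = [] then [] else [mkPara buf]
  | l :: ls =>
    if l = "" then
      if buf = [] then bFrom [] ls else mkPara buf :: bFrom [] ls
    else bFrom (buf ++ [l]) ls

-- enough fuel: bScan is independent of the exact fuel once fuel ≥ length
lemma bScan_congr : ∀ (fuel : Nat) (lines : List String), lines.length ≤ fuel →
    bScan fuel lines = bScan lines.length lines := by
  intro fuel
  induction fuel using Nat.strong_induction_on with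
  | _ fuel ih =>
    intro lines hlen
    match fuel, lines with
    | 0, [] => rfl
    | 0, l :: ls => simp at hlen
    | fuel + 1, [] => rfl
    | fuel + 1, l :: ls =>
      simp only [List.length_cons, Nat.add_le_add_iff_right] at hlen
      by_cases hl : l = ""
      · subst hl
        calc bScan (fuel + 1) ("" :: ls) = bScan fuel ls := by simp [bScan]
          _ = bScan ls.length ls := ih fuel (Nat.lt_succ_self _) ls hlen
          _ = bScan ("" :: ls).length ("" :: ls) := by simp [bScan]
      · have hdw : (ls.dropWhile (· ≠ "")).length ≤ ls.length := List.length_dropWhile_le _ _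
        simp only [bScan, hl, List.length_cons]
        rw [ih fuel (Nat.lt_succ_self _) _ (le_trans hdw hlen),
          ih ls.length (by omega) _ hdw]
        simp

lemma bFrom_spec (lines : List String) :
    bFrom [] lines = bScan lines.length lines ∧
    ∀ buf, buf ≠ [] →
      bFrom buf lines =
        mkPara (buf ++ lines.takeWhile (· ≠ "")) ::
          bScan (lines.dropWhile (· ≠ "")).length (lines.dropWhile (· ≠ "")) := by
  induction lines with
  | nil =>
    refine ⟨by simp [bFrom, bScan], ?_⟩
    intro buf h
    simp [bFrom, bScan, h]
  | cons l ls ih =>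
    obtain ⟨ih1, ih2⟩ := ih
    by_cases hl : l = ""
    · subst hl
      refine ⟨by simp [bFrom, bScan, ih1], ?_⟩
      intro buf h
      simp [bFrom, bScan, h, ih1]
    · have key : ∀ buf, bFrom (buf ++ [l]) ls =
          mkPara ((buf ++ [l]) ++ ls.takeWhile (· ≠ "")) ::
            bScan (ls.dropWhile (· ≠ "")).length (ls.dropWhile (· ≠ "")) :=
        fun buf => ih2 (buf ++ [l]) (by simp)
      have hdw : (ls.dropWhile (· ≠ "")).length ≤ ls.length := List.length_dropWhile_le _ _
      refine ⟨?_, ?_⟩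
      · have h0 := key []
        simp only [List.nil_append] at h0
        simp [bFrom, bScan, hl, h0]
        exact (bScan_congr ls.length _ (by simpa using hdw)).symm
      · intro buf h
        have hb := key buf
        simp [bFrom, hl, hb, List.append_assoc]

lemma foldA_eq (lines : List String) : ∀ paras buf,
    (if (lines.foldl aStep (paras, buf)).2 ≠ [] then
        (lines.foldl aStep (paras, buf)).1 ++ [mkPara (lines.foldl aStep (paras, buf)).2]
      else (lines.foldl aStep (paras, buf)).1) = paras ++ bFrom buf lines := by
  induction lines with
  | nil =>
    intro paras buf
    by_cases h : buf = [] <;> simp [bFrom, h]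
  | cons l ls ih =>
    intro paras buf
    by_cases hl : l = ""
    · by_cases hb : buf = []
      · simpa [List.foldl_cons, aStep, hl, hb, bFrom] using ih paras []
      · have := ih (paras ++ [mkPara buf]) []
        simp [List.foldl_cons, aStep, hl, hb, bFrom] at this ⊢
        simpa [List.append_assoc] using this
    · simpa [List.foldl_cons, aStep, hl, bFrom] using ih paras (buf ++ [l])

-- ===== VERDICT (by name: the statement is the Claim_ definition above) =====
theorem to_minimal_html_py_spec : Claim_equal_to_minimal_html_py := by
  intro text _
  unfold Spec_to_minimal_html_py
  have h := foldA_eq ((PySem.Str.splitlines text).map PySem.Str.strip) [] []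
  have h2 := (bFrom_spec ((PySem.Str.splitlines text).map PySem.Str.strip)).1
  simp only [List.nil_append] at h
  simp only [to_minimal_html_py, to_minimal_html_py_alt]
  rw [h, h2]
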